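-- pv_equiv track=rewrite | github.com/fmi08icds/HomeWorks | kuehnel/hw2/template_hw1.py | get_lower_upper
-- ===== SOURCE A (Python) =====
-- def is_perfect(n: int):
--     """
--         This function is the first helper. It takes an integer n and checks
--         if n has a perfect square root or not.
--         If n has a perfect square root, then it returns True and its
--         perfect square root. If not, it returns False and n.
--
--         INPUT: n as an integer.
--         OUTPUT: a tuple (bool, int).
--
--         Examples:
--         is_perfect(0) = (True, 0)
--         is_perfect(1) = (True, 1)
--         is_perfect(3) = (False, 3)
--         is_perfect(16) = (True, 4)
--     """
--     if n == 0 or n == 1: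
--         return True, n
--
--     for i in range(n): ## COMMENTS: range should start at 2 since n=0 and n= 1 hace already been considered in the if statement.
--         if (i**2) == n:
--             return True, i
--     return False, None
--
-- def get_lower_upper(n: int):
--     """
--         This function is the second helper. It takes an integer n and returns
--         the lower and upper perfect square root to n. We will use two "while"
--         loops here, but we could have used "for" loops or whatever.
--         The first that will catch the first perfect square root is less than
--         the square root of n.
--         The second one will catch the first square root greater than
--         the square root of n.
--
--         INPUT: n as an integer.
--         OUTPUT: a tuple (min_sqrt:int, max_sqrt:int)
--
--         Examples:
--         get_lower_upper(3) = (1,2)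
--         get_lower_upper(15) = (3,4)
--     """
--     if n <= 0:
--         return None, None
--
--     i = 1
--     lower = is_perfect(n - i)
--     upper = is_perfect(n + i)
--
--     while not lower[0]:
--         i += 1
--         lower = is_perfect(n - i) ## COMMENTS: good!
--
--     i = 1
--     while not upper[0]:
--         i += 1
--         upper = is_perfect(n + i)
--
--     return lower[1], upper[1]
-- ===== SOURCE B (Python) =====
-- def get_lower_upper(n: int):
--     if n <= 0:
--         return None, None
--     k = 0
--     while k * k < n:
--         k += 1
--     # k is the smallest root with k*k >= n
--     if k * k == n:
--         return k - 1, k + 1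
--     return k - 1, k
-- ===== Notes on version B (the rewrite author's own statement) =====
-- stated objective: faster
-- what changed: Single forward scan over candidate roots k (while k*k < n) replaces A's two outward scans over values, each of which re-tests perfect-squareness with an O(m) linear search inside is_perfect.
import Mathlib
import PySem

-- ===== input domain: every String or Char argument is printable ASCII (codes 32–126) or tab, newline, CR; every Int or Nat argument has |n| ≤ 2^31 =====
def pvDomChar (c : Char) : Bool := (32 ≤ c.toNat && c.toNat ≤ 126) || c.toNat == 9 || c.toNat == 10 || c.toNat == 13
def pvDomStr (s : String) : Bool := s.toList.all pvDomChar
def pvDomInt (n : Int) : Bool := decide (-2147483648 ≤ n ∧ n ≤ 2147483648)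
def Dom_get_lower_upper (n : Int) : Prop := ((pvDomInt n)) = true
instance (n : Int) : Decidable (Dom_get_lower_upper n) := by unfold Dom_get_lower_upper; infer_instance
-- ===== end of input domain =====

-- B replaces A's two outward value scans (each re-testing squareness by a linear search in is_perfect)
-- with a single forward scan over candidate roots k; this is asymptotically faster.

-- ===== PORT A =====
def is_perfect (n : Int) : Bool × Option Int :=
  if n == 0 || n == 1 then (true, some n)
  else
    match (PySem.List.pyRange 0 n 1).find? (fun i => i * i == n) with
    | some i => (true, some i)
    | none => (false, none)

-- 'while not lower[0]: i += 1; lower = is_perfect(n - i)'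
-- (the 'n - i < 0' branch is only a totality guard; it is never reached from the entry call)
def lowerLoop (n : Int) (i : Int) : Bool × Option Int :=
  if (is_perfect (n - i)).1 = true then is_perfect (n - i)
  else if n - i < 0 then is_perfect (n - i)
  else lowerLoop n (i + 1)
termination_by (n - i).toNat
decreasing_by
  rename_i h1 h2
  have h0 : n - i ≠ 0 := by
    intro he
    rw [he] at h1
    exact h1 (by decide)
  omega

-- 'while not upper[0]: i += 1; upper = is_perfect(n + i)'
-- (the '(n+1)*(n+1) ≤ n + i' branch is only a totality guard; it is never reached from the entry call)
def upperLoop (n : Int) (i : Int) : Bool × Option Int :=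
  if (is_perfect (n + i)).1 = true then is_perfect (n + i)
  else if (n + 1) * (n + 1) ≤ n + i then is_perfect (n + i)
  else upperLoop n (i + 1)
termination_by ((n + 1) * (n + 1) - (n + i)).toNat
decreasing_by
  rename_i h2
  omega

def get_lower_upper (n : Int) : Option Int × Option Int :=
  if n ≤ 0 then (none, none)
  else
    let lower := lowerLoop n 1
    let upper := upperLoop n 1
    (lower.2, upper.2)

-- ===== PORT B =====
-- one forward scan over candidate roots: 'while k * k < n: k += 1' (k counts up from 0, so Nat)
def bScan (n : Int) (k : Nat) : Nat :=
  if (k : Int) * k < n then bScan n (k + 1) else k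
termination_by n.toNat - k
decreasing_by
  rename_i h
  have hk : k ≤ k * k := by nlinarith
  omega

def get_lower_upper_alt (n : Int) : Option Int × Option Int :=
  if n ≤ 0 then (none, none)
  else
    let k := bScan n 0
    if (k : Int) * k == n then (some ((k : Int) - 1), some ((k : Int) + 1))
    else (some ((k : Int) - 1), some (k : Int))

-- ===== PRECONDITION & SPEC =====
def Spec_get_lower_upper (n : Int) (out : Option Int × Option Int) : Prop := out = get_lower_upper_alt n
instance (n : Int) (out : Option Int × Option Int) : Decidable (Spec_get_lower_upper n out) := by unfold Spec_get_lower_upper; infer_instance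

-- ===== CLAIM (what is proved, stated in full; the proofs are below) =====
def Claim_equal_get_lower_upper : Prop := ∀ (n : Int), Dom_get_lower_upper n → Spec_get_lower_upper n (get_lower_upper n)

-- ===== LEMMAS AND PROOFS =====
theorem is_perfect_sq (r : Nat) : is_perfect ((r : Int) * r) = (true, some (r : Int)) := by
  rcases Nat.lt_or_ge r 2 with hcase | hcase
  · interval_cases r <;> decide
  · have h2 : (2 : Int) ≤ (r : Int) := by exact_mod_cast hcase
    have hlt : (r : Int) < (r : Int) * r := by nlinarith
    unfold is_perfect
    have hne : (((r : Int) * r == 0 || (r : Int) * r == 1) = false) := by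
      simp only [Bool.or_eq_false_iff, beq_eq_false_iff_ne, ne_eq]
      constructor <;> intro h <;> nlinarith
    rw [hne]
    simp only [Bool.false_eq_true, if_false]
    rw [PySem.List.pyRange_one_append 0 (r : Int) ((r : Int) * r) (by positivity) (le_of_lt hlt)]
    rw [List.find?_append]
    have h1 : (PySem.List.pyRange 0 (r : Int) 1).find? (fun i => i * i == (r : Int) * r) = none := by
      rw [List.find?_eq_none]
      intro x hx
      rw [PySem.List.mem_pyRange_one] at hx
      simp only [beq_iff_eq]
      intro h
      nlinarith [hx.1, hx.2]
    rw [h1]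
    rw [PySem.List.pyRange_one_cons hlt]
    rw [List.find?_cons_of_pos (by simp)]
    simp

theorem is_perfect_nonsq (m : Int) (h2 : 2 ≤ m) (hns : ∀ t : Nat, (t : Int) * t ≠ m) :
    is_perfect m = (false, none) := by
  unfold is_perfect
  have hne : ((m == 0 || m == 1) = false) := by
    simp only [Bool.or_eq_false_iff, beq_eq_false_iff_ne, ne_eq]
    omega
  rw [hne]
  simp only [Bool.false_eq_true, if_false]
  have h1 : (PySem.List.pyRange 0 m 1).find? (fun i => i * i == m) = none := by
    rw [List.find?_eq_none]
    intro x hx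
    rw [PySem.List.mem_pyRange_one] at hx
    simp only [beq_iff_eq]
    intro h
    exact hns x.toNat (by rw [Int.toNat_of_nonneg hx.1]; exact h)
  rw [h1]

theorem lowerLoop_spec (n : Int) (r : Nat)
    (hr : ∀ m : Int, (r : Int) * r < m → m < n → ∀ t : Nat, (t : Int) * t ≠ m) :
    ∀ j : Nat, ∀ i : Int, 1 ≤ i → (r : Int) * r ≤ n - i → n - i - (r : Int) * r = j →
      lowerLoop n i = (true, some (r : Int)) := by
  intro j
  induction j with
  | zero =>
    intro i hi hle hj
    have he : n - i = (r : Int) * r := by omega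
    rw [lowerLoop, he, is_perfect_sq]
    simp
  | succ j ih =>
    intro i hi hle hj
    have hgt : (r : Int) * r < n - i := by omega
    have hltn : n - i < n := by omega
    have hm2 : 2 ≤ n - i := by
      by_contra hc
      push Not at hc
      have h1 : n - i = 1 := by
        have : 0 ≤ (r : Int) * r := by positivity
        omega
      exact hr (n - i) hgt hltn 1 (by rw [h1]; norm_num)
    have hns := is_perfect_nonsq (n - i) hm2 (fun t => hr (n - i) hgt hltn t)
    rw [lowerLoop, hns]
    simp only [Bool.false_eq_true, if_false]
    rw [if_neg (by omega)]
    exact ih (i + 1) (by omega) (by omega) (by omega)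

theorem upperLoop_spec (n : Int) (u : Nat) (hn : 1 ≤ n)
    (hu : ∀ m : Int, n < m → m < (u : Int) * u → ∀ t : Nat, (t : Int) * t ≠ m)
    (hub : (u : Int) * u ≤ (n + 1) * (n + 1)) :
    ∀ j : Nat, ∀ i : Int, 1 ≤ i → n + i ≤ (u : Int) * u → (u : Int) * u - (n + i) = j →
      upperLoop n i = (true, some (u : Int)) := by
  intro j
  induction j with
  | zero =>
    intro i hi hle hj
    have he : n + i = (u : Int) * u := by omega
    rw [upperLoop, he, is_perfect_sq]
    simp
  | succ j ih =>
    intro i hi hle hj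
    have hgt : n < n + i := by omega
    have hltu : n + i < (u : Int) * u := by omega
    have hm2 : 2 ≤ n + i := by omega
    have hns := is_perfect_nonsq (n + i) hm2 (fun t => hu (n + i) hgt hltu t)
    rw [upperLoop, hns]
    simp only [Bool.false_eq_true, if_false]
    rw [if_neg (by omega)]
    exact ih (i + 1) (by omega) (by omega) (by omega)

theorem bScan_spec (n : Int) (K : Nat) (hK : n ≤ (K : Int) * K)
    (hbelow : ∀ j : Nat, j < K → (j : Int) * j < n) :
    ∀ d : Nat, ∀ k : Nat, k + d = K → bScan n k = K := by
  intro d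
  induction d with
  | zero =>
    intro k hk
    have : k = K := by omega
    subst this
    rw [bScan, if_neg (by omega)]
  | succ d ih =>
    intro k hk
    rw [bScan, if_pos (hbelow k (by omega))]
    exact ih (k + 1) (by omega)

theorem no_sq_between (r : Nat) :
    ∀ m : Int, (r : Int) * r < m → m < ((r : Int) + 1) * ((r : Int) + 1) →
      ∀ t : Nat, (t : Int) * t ≠ m := by
  intro m h1 h2 t he
  subst he
  have h1' : r * r < t * t := by exact_mod_cast h1
  have h2' : t * t < (r + 1) * (r + 1) := by exact_mod_cast h2
  have ha : r < t := Nat.mul_self_lt_mul_self_iff.mp h1'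
  have hb : t < r + 1 := Nat.mul_self_lt_mul_self_iff.mp h2'
  omega

theorem main (n : Int) : get_lower_upper n = get_lower_upper_alt n := by
  by_cases hn : n ≤ 0
  · simp [get_lower_upper, get_lower_upper_alt, hn]
  · push Not at hn
    have hn1 : 1 ≤ n := hn
    have hs1 : Nat.sqrt n.toNat * Nat.sqrt n.toNat ≤ n.toNat := Nat.sqrt_le n.toNat
    have hs2 : n.toNat < (Nat.sqrt n.toNat + 1) * (Nat.sqrt n.toNat + 1) := by
      have := Nat.lt_succ_sqrt n.toNat
      omega
    set s := Nat.sqrt n.toNat with hsdef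
    have hi1 : (s : Int) * s ≤ n := by
      have h := hs1
      have : ((s * s : Nat) : Int) ≤ ((n.toNat : Nat) : Int) := by exact_mod_cast h
      push_cast at this
      omega
    have hi2 : n < ((s : Int) + 1) * ((s : Int) + 1) := by
      have : ((n.toNat : Nat) : Int) < (((s + 1) * (s + 1) : Nat) : Int) := by exact_mod_cast hs2
      push_cast at this
      omega
    have hssle : (s : Int) ≤ (s : Int) * s := by
      have : s ≤ s * s := by nlinarith
      exact_mod_cast this
    have hsle_n : (s : Int) ≤ n := le_trans hssle hi1
    have hub : ((s : Int) + 1) * ((s : Int) + 1) ≤ (n + 1) * (n + 1) := by nlinarith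
    by_cases hsq : (s : Int) * s = n
    · -- n is a perfect square, root s ≥ 1
      have hs_pos : 1 ≤ s := by
        by_contra hc
        have : s = 0 := by omega
        rw [this] at hsq
        simp at hsq
        omega
      -- lower: r = s - 1
      have hrcast : ((s - 1 : Nat) : Int) = (s : Int) - 1 := by
        push_cast [hs_pos]
        ring
      have hrsq : ((s - 1 : Nat) : Int) * ((s - 1 : Nat) : Int) ≤ n - 1 := by
        rw [hrcast]
        nlinarith [Int.natCast_pos.mpr hs_pos]
      have hlow := lowerLoop_spec n (s - 1)
        (by
          intro m h1 h2 t
          apply no_sq_between (s - 1) m h1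
          rw [hrcast]
          have : (s : Int) - 1 + 1 = (s : Int) := by ring
          rw [this]
          omega)
        (n - 1 - ((s - 1 : Nat) : Int) * ((s - 1 : Nat) : Int)).toNat 1 (by omega) (by omega) (by omega)
      -- upper: u = s + 1
      have hucast : ((s + 1 : Nat) : Int) = (s : Int) + 1 := by push_cast; ring
      have hup := upperLoop_spec n (s + 1) hn1
        (by
          intro m h1 h2 t
          apply no_sq_between s m (by omega)
          rw [hucast] at h2
          exact h2)
        (by rw [hucast]; exact hub)
        (((s + 1 : Nat) : Int) * ((s + 1 : Nat) : Int) - (n + 1)).toNat 1 (by omega)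
        (by rw [hucast]; nlinarith) (by rw [hucast]; rw [hucast] at *; omega)
      -- B: bScan n 0 = s
      have hbs := bScan_spec n s (by omega)
        (by
          intro j hj
          have hj2 : j * j < s * s := Nat.mul_self_lt_mul_self hj
          have : ((j * j : Nat) : Int) < ((s * s : Nat) : Int) := by exact_mod_cast hj2
          push_cast at this
          omega)
        s 0 (by omega)
      simp only [get_lower_upper, get_lower_upper_alt, if_neg (by omega : ¬ n ≤ 0)]
      rw [hlow, hup, hbs]
      rw [if_pos (by simp only [beq_iff_eq]; omega)]
      simp [hrcast, hucast]
    · -- s*s < n < (s+1)^2 : not a perfect square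
      have hlt : (s : Int) * s < n := lt_of_le_of_ne hi1 hsq
      -- lower: r = s
      have hlow := lowerLoop_spec n s
        (by
          intro m h1 h2 t
          exact no_sq_between s m h1 (by omega) t)
        (n - 1 - (s : Int) * s).toNat 1 (by omega) (by omega) (by omega)
      -- upper: u = s + 1
      have hucast : ((s + 1 : Nat) : Int) = (s : Int) + 1 := by push_cast; ring
      have hup := upperLoop_spec n (s + 1) hn1
        (by
          intro m h1 h2 t
          apply no_sq_between s m (by omega)
          rw [hucast] at h2
          exact h2)
        (by rw [hucast]; exact hub)
        (((s + 1 : Nat) : Int) * ((s + 1 : Nat) : Int) - (n + 1)).toNat 1 (by omega)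
        (by rw [hucast]; omega) (by rw [hucast] at *; omega)
      -- B: bScan n 0 = s + 1
      have hbs := bScan_spec n (s + 1) (by rw [← hucast] at hi2; omega)
        (by
          intro j hj
          have hj2 : j ≤ s := by omega
          have : ((j * j : Nat) : Int) ≤ ((s * s : Nat) : Int) := by
            exact_mod_cast Nat.mul_le_mul hj2 hj2
          push_cast at this
          omega)
        (s + 1) 0 (by omega)
      simp only [get_lower_upper, get_lower_upper_alt, if_neg (by omega : ¬ n ≤ 0)]
      rw [hlow, hup, hbs]
      rw [if_neg (by simp only [beq_iff_eq]; rw [hucast]; omega)]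
      simp [hucast]

-- ===== VERDICT (by name: the statement is the Claim_ definition above) =====
theorem get_lower_upper_spec : Claim_equal_get_lower_upper := by
  intro n _
  unfold Spec_get_lower_upper
  exact main n
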